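-- pv_equiv track=rewrite | github.com/julienshim/codewars-playground | Python/8 kyu/Exclamation marks series -6- Remove n exclamation marks in the sentence from left to right.py | remove
-- ===== SOURCE A (Python) =====
-- def remove(st, n):
--     result = ''
--
--     for c in st:
--         if c == '!' and n > 0:
--             n -= 1
--         else:
--             result += c
--
--     return result
-- ===== SOURCE B (Python) =====
-- def remove(st, n):
--     # Skip-scan: jump from one '!' to the next with str.find, collect the
--     # segments between the first n marks, and join them with the untouched tail.
--     parts = []
--     start = 0
--     while n > 0:
--         i = st.find('!', start)
--         if i == -1:
--             break
--         parts.append(st[start:i])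
--         start = i + 1
--         n -= 1
--     parts.append(st[start:])
--     return ''.join(parts)
-- ===== Notes on version B (the rewrite author's own statement) =====
-- stated objective: alternative
-- what changed: Instead of A's per-character loop with a countdown, B skip-scans with str.find('!', start), collects the segments between the first n marks plus the untouched tail, and joins them once.
import Mathlib
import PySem

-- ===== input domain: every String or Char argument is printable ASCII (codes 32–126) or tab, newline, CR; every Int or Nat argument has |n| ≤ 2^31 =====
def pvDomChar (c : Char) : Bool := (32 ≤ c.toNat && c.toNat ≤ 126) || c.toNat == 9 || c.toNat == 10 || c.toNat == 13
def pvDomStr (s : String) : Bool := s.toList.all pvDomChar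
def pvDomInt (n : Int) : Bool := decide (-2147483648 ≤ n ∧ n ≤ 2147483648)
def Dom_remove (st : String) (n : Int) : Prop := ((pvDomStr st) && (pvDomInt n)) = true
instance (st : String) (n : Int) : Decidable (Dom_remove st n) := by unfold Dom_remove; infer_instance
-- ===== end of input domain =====

-- B replaces A's per-character countdown loop by a skip-scan: find the next '!' with str.find, collect segments, join once (alternative decomposition).


-- ===== PORT A =====
-- loop over the characters with state (result, n), as in A
def remove (st : String) (n : Int) : String :=
  String.ofList
    (st.toList.foldl
      (fun (s : List Char × Int) c =>
        if c = '!' ∧ s.2 > 0 then (s.1, s.2 - 1) else (s.1 ++ [c], s.2))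
      ([], n)).1

-- ===== PORT B =====
-- port of Python's st.find('!', start): first index ≥ start holding '!', none for -1
def findBangFrom (cs : List Char) (start : Nat) : Option Nat :=
  ((cs.drop start).findIdx? (fun c => c = '!')).map (· + start)

-- the while loop of Source B: parts is the join-so-far, start the scan position
def removeLoop (cs : List Char) (parts : List Char) (start : Nat) (n : Int) : List Char :=
  if n > 0 then
    match findBangFrom cs start with
    | none => parts ++ cs.drop start
    | some i => removeLoop cs (parts ++ (cs.take i).drop start) (i + 1) (n - 1)
  else parts ++ cs.drop start
termination_by n.toNat
decreasing_by omega

def remove_alt (st : String) (n : Int) : String :=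
  String.ofList (removeLoop st.toList [] 0 n)

-- ===== PRECONDITION & SPEC =====
def Spec_remove (st : String) (n : Int) (out : String) : Prop := out = remove_alt st n
instance (st : String) (n : Int) (out : String) : Decidable (Spec_remove st n out) := by unfold Spec_remove; infer_instance

-- ===== CLAIM (what is proved, stated in full; the proofs are below) =====
def Claim_equal_remove : Prop := ∀ (st : String) (n : Int), Dom_remove st n → Spec_remove st n (remove st n)

-- ===== LEMMAS AND PROOFS =====
-- proof-side reference function: remove the first k '!' characters
def dropBang : List Char → Nat → List Char
  | [], _ => []
  | c :: cs, 0 => c :: cs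
  | c :: cs, k + 1 => if c = '!' then dropBang cs k else c :: dropBang cs (k + 1)

lemma dropBang_zero (cs : List Char) : dropBang cs 0 = cs := by
  cases cs <;> rfl

lemma dropBang_no_bang (cs : List Char) (k : Nat) (h : '!' ∉ cs) : dropBang cs k = cs := by
  induction cs with
  | nil => cases k <;> rfl
  | cons c cs ih =>
    cases k with
    | zero => rfl
    | succ k =>
      have hc : ¬ c = '!' := by intro hc; exact h (hc ▸ List.mem_cons_self)
      simp [dropBang, hc, ih (fun hm => h (List.mem_cons_of_mem _ hm))]

lemma dropBang_split (pre rest : List Char) (k : Nat) (h : '!' ∉ pre) :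
    dropBang (pre ++ '!' :: rest) (k + 1) = pre ++ dropBang rest k := by
  induction pre with
  | nil => simp [dropBang]
  | cons c pre ih =>
    have hc : ¬ c = '!' := by intro hc; exact h (hc ▸ List.mem_cons_self)
    simp only [List.cons_append, dropBang, if_neg hc]
    simp [ih (fun hm => h (List.mem_cons_of_mem _ hm))]

lemma remove_loop_eq (cs : List Char) (acc : List Char) (n : Int) :
    (cs.foldl
      (fun (s : List Char × Int) c =>
        if c = '!' ∧ s.2 > 0 then (s.1, s.2 - 1) else (s.1 ++ [c], s.2))
      (acc, n)).1 = acc ++ dropBang cs n.toNat := by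
  induction cs generalizing acc n with
  | nil => simp [dropBang]
  | cons c cs ih =>
    by_cases h : c = '!' ∧ n > 0
    · obtain ⟨hc, hn⟩ := h
      subst hc
      have hk : n.toNat = (n - 1).toNat + 1 := by omega
      rw [List.foldl_cons, if_pos ⟨rfl, hn⟩, ih, hk]
      simp [dropBang]
    · rw [List.foldl_cons, if_neg h, ih]
      rcases Nat.eq_zero_or_pos n.toNat with h0 | hpos
      · rw [h0, dropBang_zero, dropBang_zero]
        simp
      · have hc : ¬ c = '!' := by
          intro hc; exact h ⟨hc, by omega⟩
        obtain ⟨k, hk⟩ : ∃ k, n.toNat = k + 1 := ⟨n.toNat - 1, by omega⟩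
        rw [hk, dropBang, if_neg hc, ← hk]
        simp

lemma removeLoop_eq (cs : List Char) (parts : List Char) (start : Nat) (n : Int) :
    removeLoop cs parts start n = parts ++ dropBang (cs.drop start) n.toNat := by
  induction hfuel : n.toNat generalizing parts start n with
  | zero =>
    have hn : ¬ n > 0 := by omega
    rw [removeLoop, if_neg hn, dropBang_zero]
  | succ k ih =>
    have hn : n > 0 := by omega
    rw [removeLoop, if_pos hn]
    cases hf : findBangFrom cs start with
    | none =>
      have hno : '!' ∉ cs.drop start := by
        have h0 : (cs.drop start).findIdx? (fun c => c = '!') = none := by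
          simpa [findBangFrom] using hf
        intro hm
        have := List.findIdx?_eq_none_iff.mp h0 '!' hm
        simp at this
      show parts ++ cs.drop start = parts ++ dropBang (cs.drop start) (k + 1)
      rw [dropBang_no_bang _ _ hno]
    | some i =>
      obtain ⟨j, hj, hij⟩ : ∃ j, (cs.drop start).findIdx? (fun c => c = '!') = some j ∧ i = j + start := by
        rcases hfm : (cs.drop start).findIdx? (fun c => c = '!') with _ | j
        · simp [findBangFrom, hfm] at hf
        · refine ⟨j, rfl, ?_⟩
          simp [findBangFrom, hfm] at hf
          omega
      obtain ⟨hjlt, hget, hmin⟩ := List.findIdx?_eq_some_iff_getElem.mp hj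
      have hgj : (cs.drop start)[j] = '!' := by simpa using hget
      have hpre : '!' ∉ (cs.drop start).take j := by
        intro hm
        obtain ⟨m, hmlt, hmj⟩ := List.mem_take_iff_getElem.mp hm
        have hmlt' : m < j := by omega
        have hne := hmin m hmlt'
        have heq : (cs.drop start)[m]'(by omega) = '!' := by
          rw [← hmj]
        simp [heq] at hne
      have hsplit : cs.drop start = (cs.drop start).take j ++ '!' :: (cs.drop start).drop (j + 1) := by
        conv_lhs => rw [← List.take_append_drop j (cs.drop start)]
        congr 1
        rw [List.drop_eq_getElem_cons hjlt, hgj]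
      show removeLoop cs (parts ++ (cs.take i).drop start) (i + 1) (n - 1)
          = parts ++ dropBang (cs.drop start) (k + 1)
      rw [ih _ _ (n - 1) (by omega)]
      have htk : (cs.take i).drop start = (cs.drop start).take j := by
        rw [hij, List.drop_take]
        congr 1
        omega
      have hdr : cs.drop (i + 1) = (cs.drop start).drop (j + 1) := by
        rw [List.drop_drop, hij]
        congr 1
        omega
      rw [htk, hdr]
      conv_rhs => rw [hsplit]
      rw [dropBang_split _ _ _ hpre, List.append_assoc]

-- ===== VERDICT (by name: the statement is the Claim_ definition above) =====
theorem remove_spec : Claim_equal_remove := by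
  intro st n _
  unfold Spec_remove remove remove_alt
  rw [remove_loop_eq, removeLoop_eq]
  simp
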